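-- pv_equiv track=rewrite | github.com/hungkimanh/Project_ | generate_batch_release_equal_from_50.py | build_clustered_batches
-- ===== SOURCE A (Python) =====
-- from typing import List, Tuple
--
-- def _dist2(a: List[int], b: List[int]) -> int:
--     dx = a[0] - b[0]
--     dy = a[1] - b[1]
--     return dx * dx + dy * dy
--
-- def build_clustered_batches(customers: List[List[int]], sizes: List[int], depot_xy: Tuple[int, int]) -> List[List[List[int]]]:
--     remaining = [c[:] for c in customers]
--     depot = [depot_xy[0], depot_xy[1], 0, 0]
--     batches: List[List[List[int]]] = []
--
--     for size in sizes:
--         if not remaining: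
--             break
--
--         # Start a batch from the customer closest to depot, then grow by nearest neighbors.
--         seed = min(remaining, key=lambda c: _dist2(c, depot))
--         batch = [seed]
--         remaining.remove(seed)
--
--         while len(batch) < size and remaining:
--             nxt = min(remaining, key=lambda c: min(_dist2(c, b) for b in batch))
--             batch.append(nxt)
--             remaining.remove(nxt)
--
--         batches.append(batch)
--
--     if remaining:
--         if not batches:
--             batches.append([])
--         batches[-1].extend(remaining)
--
--     return batches
-- ===== SOURCE B (Python) =====
-- from typing import List, Tuple
--
-- def _argmin(vals: List[int]) -> int:
--     # index of the first minimum
--     j, m = 0, vals[0]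
--     for i, v in enumerate(vals[1:], 1):
--         if v < m:
--             j, m = i, v
--     return j
--
-- def build_clustered_batches(customers: List[List[int]], sizes: List[int], depot_xy: Tuple[int, int]) -> List[List[List[int]]]:
--     rem = [c[:] for c in customers]
--     dx0, dy0 = depot_xy[0], depot_xy[1]
--     batches: List[List[List[int]]] = []
--     for size in sizes:
--         if not rem:
--             break
--         d0 = [(c[0] - dx0) ** 2 + (c[1] - dy0) ** 2 for c in rem]
--         j = _argmin(d0)
--         seed = rem.pop(j)
--         batch = [seed]
--         # mind[i] = min squared distance from rem[i] to any batch member, kept incrementally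
--         mind = [(c[0] - seed[0]) ** 2 + (c[1] - seed[1]) ** 2 for c in rem]
--         while len(batch) < size and rem:
--             j = _argmin(mind)
--             nxt = rem.pop(j)
--             mind.pop(j)
--             batch.append(nxt)
--             for i, c in enumerate(rem):
--                 d = (c[0] - nxt[0]) ** 2 + (c[1] - nxt[1]) ** 2
--                 if d < mind[i]:
--                     mind[i] = d
--         batches.append(batch)
--     if rem:
--         if not batches:
--             batches.append([])
--         batches[-1].extend(rem)
--     return batches
-- ===== Notes on version B (the rewrite author's own statement) =====
-- stated objective: alternative
-- what changed: Instead of recomputing min(dist2(c,b) for b in batch) over the whole batch for every remaining customer at every selection, B keeps a per-remaining-customer array of the minimum squared distance to the batch, updates it in one pass when a member is added, and picks each next member by a single argmin scan over that array.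
import Mathlib
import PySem

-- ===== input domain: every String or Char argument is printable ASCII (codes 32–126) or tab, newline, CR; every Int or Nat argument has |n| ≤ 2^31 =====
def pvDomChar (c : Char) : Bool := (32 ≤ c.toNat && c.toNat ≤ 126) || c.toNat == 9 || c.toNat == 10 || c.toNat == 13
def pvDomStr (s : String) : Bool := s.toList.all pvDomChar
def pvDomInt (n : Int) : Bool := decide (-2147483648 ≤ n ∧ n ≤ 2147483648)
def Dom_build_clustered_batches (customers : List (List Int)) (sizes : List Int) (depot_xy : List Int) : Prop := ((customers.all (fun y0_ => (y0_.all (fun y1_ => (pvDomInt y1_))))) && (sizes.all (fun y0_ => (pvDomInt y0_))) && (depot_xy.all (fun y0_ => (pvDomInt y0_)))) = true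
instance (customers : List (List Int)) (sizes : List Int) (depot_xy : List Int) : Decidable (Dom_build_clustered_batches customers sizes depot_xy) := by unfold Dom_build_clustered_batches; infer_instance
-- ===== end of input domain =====

-- B replaces A's rescan of min-distance-to-batch over the whole batch at every selection by an
-- incrementally maintained per-customer min-distance array (a different algorithm; not measured faster
-- on the generated inputs).

-- ===== PORT A =====
-- _dist2(a, b); Pre_ guarantees indices 0 and 1 are in range, so pyGetD's default is unreachable
def pvD2 (a b : List Int) : Int :=
  let dx := PySem.List.pyGetD a 0 0 - PySem.List.pyGetD b 0 0
  let dy := PySem.List.pyGetD a 1 0 - PySem.List.pyGetD b 1 0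
  dx * dx + dy * dy

-- min(generator) over a NONEMPTY batch (Python would raise on empty; callers always pass nonempty)
def pvGenMin : List Int → Int
  | [] => 0
  | x :: xs => xs.foldl min x

-- the inner `while len(batch) < size and remaining:` loop; fuel = remaining.length at call,
-- and each iteration removes exactly one element, so fuel never runs out before the loop ends
def pvGrowA : Nat → Int → List (List Int) → List (List Int) → (List (List Int)) × (List (List Int))
  | 0, _, batch, rem => (batch, rem)
  | fuel+1, size, batch, rem =>
    if (batch.length : Int) < size ∧ rem ≠ [] then
      match PySem.List.min? rem (fun c => pvGenMin (batch.map (fun b => pvD2 c b))) with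
      | some nxt =>
        match PySem.List.remove? rem nxt with
        | some rem' => pvGrowA fuel size (batch ++ [nxt]) rem'
        | none => (batch, rem)   -- unreachable: nxt ∈ rem
      | none => (batch, rem)     -- unreachable: rem ≠ []
    else (batch, rem)

-- the `for size in sizes:` loop; returns (batches, remaining)
def pvLoopA (depot : List Int) : List Int → List (List Int) → List (List (List Int)) → (List (List (List Int))) × (List (List Int))
  | [], rem, batches => (batches, rem)
  | size :: rest, rem, batches =>
    if rem = [] then (batches, rem)    -- break
    else
      match PySem.List.min? rem (fun c => pvD2 c depot) with
      | some seed =>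
        match PySem.List.remove? rem seed with
        | some rem1 =>
          let p := pvGrowA rem1.length size [seed] rem1
          pvLoopA depot rest p.2 (batches ++ [p.1])
        | none => (batches, rem)       -- unreachable: seed ∈ rem
      | none => (batches, rem)         -- unreachable: rem ≠ []

def build_clustered_batches (customers : List (List Int)) (sizes : List Int) (depot_xy : List Int) : List (List (List Int)) :=
  let remaining := customers.map (fun c => c)   -- [c[:] for c in customers]
  let depot : List Int := [PySem.List.pyGetD depot_xy 0 0, PySem.List.pyGetD depot_xy 1 0, 0, 0]
  let p := pvLoopA depot sizes remaining []
  if p.2 = [] then p.1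
  else match p.1 with
    | [] => [p.2]                                                -- batches.append([]); batches[-1].extend(remaining)
    | b :: bs => (b :: bs).dropLast ++ [(b :: bs).getLast (by simp) ++ p.2]   -- batches[-1].extend(remaining)

-- ===== PORT B =====
-- (c[0]-t[0])**2 + (c[1]-t[1])**2
def pvD2alt (c t : List Int) : Int :=
  (PySem.List.pyGetD c 0 0 - PySem.List.pyGetD t 0 0) ^ 2 + (PySem.List.pyGetD c 1 0 - PySem.List.pyGetD t 1 0) ^ 2

-- (c[0]-dx0)**2 + (c[1]-dy0)**2
def pvDep2 (c : List Int) (dx0 dy0 : Int) : Int :=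
  (PySem.List.pyGetD c 0 0 - dx0) ^ 2 + (PySem.List.pyGetD c 1 0 - dy0) ^ 2

-- _argmin's loop: state (j, m), i = index of the head of the unscanned suffix
def pvArgminAux : Nat → Nat → Int → List Int → Nat
  | _, j, _, [] => j
  | i, j, m, v :: rest => if v < m then pvArgminAux (i+1) i v rest else pvArgminAux (i+1) j m rest

-- _argmin(vals): index of the first minimum (vals nonempty at every call site)
def pvArgmin : List Int → Nat
  | [] => 0
  | v :: rest => pvArgminAux 1 0 v rest

-- the while loop with the maintained min-distance array `mind` (mind[i] = min dist² of rem[i] to batch);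
-- rem.pop(j)/mind.pop(j) with the always-in-range j become getD/eraseIdx; the in-place
-- `if d < mind[i]: mind[i] = d` update loop becomes the zip-map
def pvGrowB : Nat → Int → List (List Int) → List (List Int) → List Int → (List (List Int)) × (List (List Int))
  | 0, _, batch, rem, _ => (batch, rem)
  | fuel+1, size, batch, rem, mind =>
    if (batch.length : Int) < size ∧ rem ≠ [] then
      let j := pvArgmin mind
      let nxt := rem.getD j []
      let rem' := rem.eraseIdx j
      let mind' := mind.eraseIdx j
      let mind'' := (rem'.zip mind').map (fun p => let d := pvD2alt p.1 nxt; if d < p.2 then d else p.2)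
      pvGrowB fuel size (batch ++ [nxt]) rem' mind''
    else (batch, rem)

def pvLoopB (dx0 dy0 : Int) : List Int → List (List Int) → List (List (List Int)) → (List (List (List Int))) × (List (List Int))
  | [], rem, batches => (batches, rem)
  | size :: rest, rem, batches =>
    if rem = [] then (batches, rem)
    else
      let d0 := rem.map (fun c => pvDep2 c dx0 dy0)
      let j := pvArgmin d0
      let seed := rem.getD j []
      let rem1 := rem.eraseIdx j
      let mind := rem1.map (fun c => pvD2alt c seed)
      let p := pvGrowB rem1.length size [seed] rem1 mind
      pvLoopB dx0 dy0 rest p.2 (batches ++ [p.1])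

def build_clustered_batches_alt (customers : List (List Int)) (sizes : List Int) (depot_xy : List Int) : List (List (List Int)) :=
  let rem := customers.map (fun c => c)
  let dx0 := PySem.List.pyGetD depot_xy 0 0
  let dy0 := PySem.List.pyGetD depot_xy 1 0
  let p := pvLoopB dx0 dy0 sizes rem []
  if p.2 = [] then p.1
  else match p.1 with
    | [] => [p.2]
    | b :: bs => (b :: bs).dropLast ++ [(b :: bs).getLast (by simp) ++ p.2]

-- ===== PRECONDITION & SPEC =====
-- Pre_ excludes exactly the inputs where Python A raises IndexError: a depot_xy with fewer than
-- two coordinates, and (when the clustering loop actually runs) a customer with fewer than two.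
def Pre_build_clustered_batches (customers : List (List Int)) (sizes : List Int) (depot_xy : List Int) : Prop :=
  2 ≤ depot_xy.length ∧ (sizes = [] ∨ customers = [] ∨ ∀ c ∈ customers, 2 ≤ c.length)
instance (customers : List (List Int)) (sizes : List Int) (depot_xy : List Int) : Decidable (Pre_build_clustered_batches customers sizes depot_xy) := by unfold Pre_build_clustered_batches; infer_instance

def pvWitness_build_clustered_batches : List (List Int) × List Int × List Int := ([[0,0],[3,0],[1,0]], [2], [0,0])

def Spec_build_clustered_batches (customers : List (List Int)) (sizes : List Int) (depot_xy : List Int) (out : List (List (List Int))) : Prop := out = build_clustered_batches_alt customers sizes depot_xy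
instance (customers : List (List Int)) (sizes : List Int) (depot_xy : List Int) (out : List (List (List Int))) : Decidable (Spec_build_clustered_batches customers sizes depot_xy out) := by unfold Spec_build_clustered_batches; infer_instance

-- ===== CLAIM (what is proved, stated in full; the proofs are below) =====
def Claim_equal_build_clustered_batches : Prop := ∀ (customers : List (List Int)) (sizes : List Int) (depot_xy : List Int), Dom_build_clustered_batches customers sizes depot_xy → Pre_build_clustered_batches customers sizes depot_xy → Spec_build_clustered_batches customers sizes depot_xy (build_clustered_batches customers sizes depot_xy)

-- ===== LEMMAS AND PROOFS =====

-- one step of Python min's left fold, carrying the current best element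
def pvMinStep (f : List Int → Int) (s y : List Int) : List Int := if f y < f s then y else s

theorem pv_if_min (m d : Int) : (if d < m then d else m) = min m d := by
  rw [min_def]; split_ifs <;> omega

theorem pv_min?_cons (f : List Int → Int) :
    ∀ (t : List (List Int)) (x : List Int),
    PySem.List.min? (x :: t) f = some (t.foldl (pvMinStep f) x) := by
  intro t
  induction t with
  | nil => intro x; rfl
  | cons y t ih =>
    intro x
    have h1 : PySem.List.min? (x :: y :: t) f = PySem.List.min? (pvMinStep f x y :: t) f := by
      simp only [PySem.List.min?, List.foldl_cons, pvMinStep]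
      by_cases h : f y < f x <;> simp [h]
    rw [h1, ih, List.foldl_cons]

theorem pv_lock (f : List Int → Int) :
    ∀ (rest : List (List Int)) (i j : Nat) (e : List Int),
      (pvArgminAux i j (f e) (rest.map f) = j ∧ rest.foldl (pvMinStep f) e = e ∧ ∀ v ∈ rest, f e ≤ f v)
      ∨ (∃ p x s, rest = p ++ x :: s ∧ pvArgminAux i j (f e) (rest.map f) = i + p.length
          ∧ rest.foldl (pvMinStep f) e = x ∧ f x < f e ∧ (∀ v ∈ p, f x < f v) ∧ (∀ v ∈ s, f x ≤ f v)) := by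
  intro rest
  induction rest with
  | nil => intro i j e; left; exact ⟨rfl, rfl, by simp⟩
  | cons v r ih =>
    intro i j e
    by_cases hv : f v < f e
    · -- state switches to (i, v)
      have step : pvArgminAux i j (f e) ((v :: r).map f) = pvArgminAux (i+1) i (f v) (r.map f) := by
        simp [pvArgminAux, hv]
      have fold : (v :: r).foldl (pvMinStep f) e = r.foldl (pvMinStep f) v := by
        simp [List.foldl_cons, pvMinStep, hv]
      rcases ih (i+1) i v with ⟨h1, h2, h3⟩ | ⟨p, x, s, hr, h1, h2, h3, h4, h5⟩
      · right
        exact ⟨[], v, r, by simp, by rw [step, h1]; simp, by rw [fold, h2], hv, by simp, h3⟩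
      · right
        refine ⟨v :: p, x, s, by simp [hr], ?_, by rw [fold, h2], lt_trans h3 hv, ?_, h5⟩
        · rw [step, h1]; simp; omega
        · intro w hw
          rcases List.mem_cons.mp hw with h | h
          · subst h; exact h3
          · exact h4 w h
    · -- state keeps (j, e)
      have step : pvArgminAux i j (f e) ((v :: r).map f) = pvArgminAux (i+1) j (f e) (r.map f) := by
        simp [pvArgminAux, hv]
      have fold : (v :: r).foldl (pvMinStep f) e = r.foldl (pvMinStep f) e := by
        simp [List.foldl_cons, pvMinStep, hv]
      have hev : f e ≤ f v := not_lt.mp hv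
      rcases ih (i+1) j e with ⟨h1, h2, h3⟩ | ⟨p, x, s, hr, h1, h2, h3, h4, h5⟩
      · left
        refine ⟨by rw [step, h1], by rw [fold, h2], ?_⟩
        intro w hw
        rcases List.mem_cons.mp hw with h | h
        · subst h; exact hev
        · exact h3 w h
      · right
        refine ⟨v :: p, x, s, by simp [hr], ?_, by rw [fold, h2], h3, ?_, h5⟩
        · rw [step, h1]; simp; omega
        · intro w hw
          rcases List.mem_cons.mp hw with h | h
          · subst h; exact lt_of_lt_of_le h3 hev
          · exact h4 w h

theorem pv_select (f : List Int → Int) (x : List Int) (t : List (List Int)) :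
    PySem.List.min? (x :: t) f = some ((x :: t).getD (pvArgmin ((x :: t).map f)) [])
    ∧ PySem.List.remove? (x :: t) ((x :: t).getD (pvArgmin ((x :: t).map f)) [])
        = some ((x :: t).eraseIdx (pvArgmin ((x :: t).map f))) := by
  have hargm : pvArgmin ((x :: t).map f) = pvArgminAux 1 0 (f x) (t.map f) := by
    simp [pvArgmin]
  rcases pv_lock f t 1 0 x with ⟨h1, h2, _⟩ | ⟨p, y, s, hr, h1, h2, h3, h4, _⟩
  · rw [hargm, h1]
    simp only [List.getD_cons_zero, List.eraseIdx_cons_zero]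
    refine ⟨by rw [pv_min?_cons, h2], ?_⟩
    exact PySem.List.remove?_cons_self x t
  · rw [hargm, h1, hr, Nat.add_comm 1 p.length]
    have hjlen : p.length + 1 < (x :: (p ++ y :: s)).length := by
      simp [List.length_append]
    have hget : (x :: (p ++ y :: s)).getD (p.length + 1) [] = y := by
      rw [List.getD_eq_getElem _ _ hjlen, List.getElem_cons_succ]
      simp
    rw [hget]
    constructor
    · rw [pv_min?_cons, hr] at *
      rw [h2]
    · have hidx : List.idxOf? y (x :: (p ++ y :: s)) = some (p.length + 1) := by
        rw [List.idxOf?_eq_some_iff]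
        refine ⟨hjlen, ?_, ?_⟩
        · rw [List.getElem_cons_succ]
          simp
        · intro k hk
          match k with
          | 0 =>
            simp only [List.getElem_cons_zero]
            intro hxy
            rw [hxy] at h3; exact absurd h3 (lt_irrefl _)
          | (k'+1) =>
            have hk' : k' < p.length := by omega
            rw [List.getElem_cons_succ]
            rw [List.getElem_append_left hk']
            intro hpy
            have := h4 p[k'] (List.getElem_mem hk')
            rw [hpy] at this; exact absurd this (lt_irrefl _)
      simp [PySem.List.remove?, hidx]

theorem pv_genMin_app (l : List Int) (hl : l ≠ []) (a : Int) :
    pvGenMin (l ++ [a]) = min (pvGenMin l) a := by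
  match l with
  | [] => exact absurd rfl hl
  | x :: xs => simp [pvGenMin, List.foldl_append]

theorem pv_d2_eq (c t : List Int) : pvD2alt c t = pvD2 c t := by
  simp [pvD2alt, pvD2]; ring

theorem pv_dep2_eq (c : List Int) (dx0 dy0 : Int) :
    pvDep2 c dx0 dy0 = pvD2 c [dx0, dy0, 0, 0] := by
  simp [pvDep2, pvD2, PySem.List.pyGetD]; ring

theorem pv_grow_eq : ∀ (fuel : Nat) (size : Int) (batch rem : List (List Int)), batch ≠ [] →
    pvGrowA fuel size batch rem
      = pvGrowB fuel size batch rem (rem.map (fun c => pvGenMin (batch.map (fun b => pvD2 c b)))) := by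
  intro fuel
  induction fuel with
  | zero => intro size batch rem _; rfl
  | succ fuel ih =>
    intro size batch rem hb
    by_cases hc : (batch.length : Int) < size ∧ rem ≠ []
    · match rem, hc.2 with
      | x :: t, _ =>
        set f : List Int → Int := fun c => pvGenMin (batch.map (fun b => pvD2 c b)) with hf
        obtain ⟨hmin, hrem⟩ := pv_select f x t
        have hmap : (x :: t).map f = f x :: t.map f := by simp
        set j := pvArgmin ((x :: t).map f) with hj
        set nxt := (x :: t).getD j [] with hnxt
        set rem' := (x :: t).eraseIdx j with hrem'
        have hA : pvGrowA (fuel+1) size batch (x :: t) = pvGrowA fuel size (batch ++ [nxt]) rem' := by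
          rw [pvGrowA]
          simp only [if_pos hc]
          rw [← hf]
          simp only [hmin, hrem]
        have hB : pvGrowB (fuel+1) size batch (x :: t) ((x :: t).map f)
            = pvGrowB fuel size (batch ++ [nxt]) rem'
              ((rem'.zip (rem'.map f)).map (fun p => let d := pvD2alt p.1 nxt; if d < p.2 then d else p.2)) := by
          rw [pvGrowB]
          simp only [if_pos hc]
          rw [← List.eraseIdx_map f (x :: t) j]
        have hmind : ((rem'.zip (rem'.map f)).map (fun p => let d := pvD2alt p.1 nxt; if d < p.2 then d else p.2))
            = rem'.map (fun c => pvGenMin ((batch ++ [nxt]).map (fun b => pvD2 c b))) := by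
          have hz : rem'.zip (rem'.map f) = rem'.map (fun c => (c, f c)) := by
            simpa using (List.zip_map' (f := id) (g := f) (l := rem'))
          rw [hz, List.map_map]
          apply List.map_congr_left
          intro c _
          show (let d := pvD2alt c nxt; if d < f c then d else f c) = _
          rw [List.map_append]
          simp only [List.map_cons, List.map_nil]
          rw [pv_genMin_app _ (by simpa using hb) (pvD2 c nxt)]
          rw [pv_d2_eq, pv_if_min]
        rw [hA, hB, hmind]
        exact ih size (batch ++ [nxt]) rem' (by simp)
    · rw [pvGrowA, pvGrowB]
      simp only [if_neg hc]

theorem pv_loop_eq (dx0 dy0 : Int) :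
    ∀ (sizes : List Int) (rem : List (List Int)) (batches : List (List (List Int))),
      pvLoopA [dx0, dy0, 0, 0] sizes rem batches = pvLoopB dx0 dy0 sizes rem batches := by
  intro sizes
  induction sizes with
  | nil => intro rem batches; rfl
  | cons size rest ih =>
    intro rem batches
    by_cases hr : rem = []
    · rw [pvLoopA, pvLoopB]
      simp only [if_pos hr]
    · match rem, hr with
      | x :: t, _ =>
        set f : List Int → Int := fun c => pvD2 c [dx0, dy0, 0, 0] with hf
        obtain ⟨hmin, hrem⟩ := pv_select f x t
        set j := pvArgmin ((x :: t).map f) with hj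
        set seed := (x :: t).getD j [] with hseed
        set rem1 := (x :: t).eraseIdx j with hrem1
        have hA : pvLoopA [dx0, dy0, 0, 0] (size :: rest) (x :: t) batches
            = pvLoopA [dx0, dy0, 0, 0] rest (pvGrowA rem1.length size [seed] rem1).2
                (batches ++ [(pvGrowA rem1.length size [seed] rem1).1]) := by
          rw [pvLoopA]
          simp only [if_neg (List.cons_ne_nil x t)]
          rw [← hf]
          simp only [hmin, hrem]
        have hdep : (fun c => pvDep2 c dx0 dy0) = f := funext fun c => pv_dep2_eq c dx0 dy0
        have hgm : rem1.map (fun c => pvD2alt c seed)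
            = rem1.map (fun c => pvGenMin (([seed] : List (List Int)).map (fun b => pvD2 c b))) := by
          apply List.map_congr_left
          intro c _
          simp only [List.map_cons, List.map_nil]
          rw [pv_d2_eq]
          rfl
        have hB : pvLoopB dx0 dy0 (size :: rest) (x :: t) batches
            = pvLoopB dx0 dy0 rest (pvGrowA rem1.length size [seed] rem1).2
                (batches ++ [(pvGrowA rem1.length size [seed] rem1).1]) := by
          rw [pvLoopB]
          simp only [if_neg (List.cons_ne_nil x t)]
          rw [hdep, ← hj, ← hseed, ← hrem1, hgm, ← pv_grow_eq rem1.length size [seed] rem1 (by simp)]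
        rw [hA, hB]
        exact ih _ _

-- ===== VERDICT (by name: the statement is the Claim_ definition above) =====
theorem build_clustered_batches_spec : Claim_equal_build_clustered_batches := by
  intro customers sizes depot_xy _ _
  unfold Spec_build_clustered_batches build_clustered_batches build_clustered_batches_alt
  dsimp only
  rw [pv_loop_eq]
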